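-- pv_equiv track=rewrite | github.com/YashC6789/agentDistillation | train_grpo_h100.py | get_question_and_answer
-- ===== SOURCE A (Python) =====
-- def get_question_and_answer(messages):
--     question = ""
--     gold_answer = ""
--
--     for msg in messages:
--         role = msg.get("role", "")
--         content = msg.get("content", "")
--
--         if role == "user":
--             question = content
--         elif role == "assistant":
--             gold_answer = content
--
--     return question, gold_answer
-- ===== SOURCE B (Python) =====
-- def get_question_and_answer(messages):
--     question = next((m.get("content", "") for m in reversed(messages)
--                      if m.get("role", "") == "user"), "")
--     gold_answer = next((m.get("content", "") for m in reversed(messages)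
--                         if m.get("role", "") == "assistant"), "")
--     return question, gold_answer
-- ===== Notes on version B (the rewrite author's own statement) =====
-- stated objective: idiomatic
-- what changed: Replaces the forward overwrite loop with two reverse-order searches via next() over reversed(messages), taking the first (i.e. last) user and assistant messages directly.
import Mathlib
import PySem

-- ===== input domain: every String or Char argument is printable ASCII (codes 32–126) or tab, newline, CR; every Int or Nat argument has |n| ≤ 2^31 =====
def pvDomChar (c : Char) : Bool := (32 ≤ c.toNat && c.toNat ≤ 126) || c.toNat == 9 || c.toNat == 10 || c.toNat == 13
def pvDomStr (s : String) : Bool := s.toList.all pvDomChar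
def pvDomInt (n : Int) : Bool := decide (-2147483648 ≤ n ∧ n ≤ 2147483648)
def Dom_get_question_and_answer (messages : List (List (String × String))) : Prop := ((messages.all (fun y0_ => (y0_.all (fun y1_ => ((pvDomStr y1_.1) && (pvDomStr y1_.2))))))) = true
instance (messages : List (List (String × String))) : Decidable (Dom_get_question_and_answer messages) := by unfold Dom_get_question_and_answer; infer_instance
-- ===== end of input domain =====

-- B is the same task written idiomatically: two reverse-order searches (first match from the
-- end) instead of A's forward loop that overwrites; return values only, no side effects.

-- msg.get(k, d) on a Python dict, as an association-list lookup (first match, default d)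
def dictGetD (m : List (String × String)) (k d : String) : String :=
  match m.find? (fun p => p.1 == k) with
  | some p => p.2
  | none   => d

-- ===== PORT A =====
def get_question_and_answer (messages : List (List (String × String))) : String × String :=
  messages.foldl
    (fun (s : String × String) msg =>
      let role := dictGetD msg "role" ""
      let content := dictGetD msg "content" ""
      if role == "user" then (content, s.2)
      else if role == "assistant" then (s.1, content)
      else s)
    ("", "")

-- ===== PORT B =====
-- next((m.get("content","") for m in reversed(messages) if m.get("role","") == r), "")
def pickLast (r : String) (messages : List (List (String × String))) : String :=
  match messages.reverse.find? (fun m => dictGetD m "role" "" == r) with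
  | some m => dictGetD m "content" ""
  | none   => ""

def get_question_and_answer_alt (messages : List (List (String × String))) : String × String :=
  (pickLast "user" messages, pickLast "assistant" messages)

-- ===== PRECONDITION & SPEC =====
def Spec_get_question_and_answer (messages : List (List (String × String))) (out : String × String) : Prop := out = get_question_and_answer_alt messages
instance (messages : List (List (String × String))) (out : String × String) : Decidable (Spec_get_question_and_answer messages out) := by unfold Spec_get_question_and_answer; infer_instance

-- ===== CLAIM (what is proved, stated in full; the proofs are below) =====
def Claim_equal_get_question_and_answer : Prop := ∀ (messages : List (List (String × String))), Dom_get_question_and_answer messages → Spec_get_question_and_answer messages (get_question_and_answer messages)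

-- ===== LEMMAS AND PROOFS =====

-- B's reverse search with an explicit default, so the loop invariant can carry A's state
def pickLastD (r : String) (messages : List (List (String × String))) (d : String) : String :=
  match messages.reverse.find? (fun m => dictGetD m "role" "" == r) with
  | some m => dictGetD m "content" ""
  | none   => d

theorem pickLastD_nil (r d : String) : pickLastD r [] d = d := rfl

theorem pickLastD_cons (r d : String) (x : List (String × String))
    (xs : List (List (String × String))) :
    pickLastD r (x :: xs) d
      = pickLastD r xs (if dictGetD x "role" "" == r then dictGetD x "content" "" else d) := by
  simp only [pickLastD, List.reverse_cons, List.find?_append]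
  cases h : xs.reverse.find? (fun m => dictGetD m "role" "" == r) with
  | some m => simp
  | none =>
    simp only [Option.none_or]
    by_cases hx : dictGetD x "role" "" == r
    · simp [List.find?, hx]
    · simp [List.find?, hx]

theorem foldl_eq_pickLastD (xs : List (List (String × String))) (q g : String) :
    xs.foldl
      (fun (s : String × String) msg =>
        let role := dictGetD msg "role" ""
        let content := dictGetD msg "content" ""
        if role == "user" then (content, s.2)
        else if role == "assistant" then (s.1, content)
        else s)
      (q, g)
    = (pickLastD "user" xs q, pickLastD "assistant" xs g) := by
  induction xs generalizing q g with
  | nil => simp [pickLastD_nil]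
  | cons x xs ih =>
    rw [List.foldl_cons, pickLastD_cons, pickLastD_cons]
    by_cases hu : (dictGetD x "role" "" == "user") = true
    · have ha : (dictGetD x "role" "" == "assistant") = false := by simp_all
      simp only [hu, ha, Bool.false_eq_true, if_true, if_false]
      exact ih _ _
    · have hu2 : (dictGetD x "role" "" == "user") = false := by simpa using hu
      by_cases ha : (dictGetD x "role" "" == "assistant") = true
      · simp only [hu2, ha, Bool.false_eq_true, if_true, if_false]
        exact ih _ _
      · have ha2 : (dictGetD x "role" "" == "assistant") = false := by simpa using ha
        simp only [hu2, ha2, Bool.false_eq_true, if_false]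
        exact ih _ _

-- ===== VERDICT (by name: the statement is the Claim_ definition above) =====
theorem get_question_and_answer_spec : Claim_equal_get_question_and_answer := by
  intro messages _
  show get_question_and_answer messages = get_question_and_answer_alt messages
  unfold get_question_and_answer get_question_and_answer_alt
  rw [foldl_eq_pickLastD]
  rfl
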